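-- pv_equiv track=rewrite | github.com/trishullab/clever-prover | src/clever_prover/utils/string_utils.py | parse_example_prompt_list
-- ===== SOURCE A (Python) =====
-- def parse_example_prompt_list(example_prompt_str: str) -> list[dict[str, str]]:
--     example_prompt_list = []
--     curr_ind = example_prompt_str.find("`example_user`")
--     i = 0
--     while curr_ind != -1:
--         curr_name = "example_user" if i % 2 == 0 else "example_assistant"
--         curr_ind += len(f"`{curr_name}`")
--         next_name = "example_assistant" if i % 2 == 0 else "example_user"
--         next_ind = example_prompt_str.find(f"`{next_name}`", curr_ind)
--         if next_ind != -1: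
--             content = example_prompt_str[curr_ind:next_ind].strip()
--         else:
--             content = example_prompt_str[curr_ind:].strip()
--         example_prompt_list.append({"role": "system", "name": curr_name, "content": content})
--         curr_ind = next_ind
--         i += 1
--     return example_prompt_list
-- ===== SOURCE B (Python) =====
-- def parse_example_prompt_list(example_prompt_str: str) -> list[dict[str, str]]:
--     s = example_prompt_str
--     USER, ASST = "`example_user`", "`example_assistant`"
--     # one scan: collect every start position of each marker, in increasing order
--     user_pos = [j for j in range(len(s)) if s.startswith(USER, j)]
--     asst_pos = [j for j in range(len(s)) if s.startswith(ASST, j)]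
--     out = []
--     if not user_pos:
--         return out
--     is_user = True
--     cursor = user_pos[0] + len(USER)
--     while True:
--         opp = asst_pos if is_user else user_pos
--         while opp and opp[0] < cursor:
--             opp.pop(0)
--         name = "example_user" if is_user else "example_assistant"
--         if not opp:
--             out.append({"role": "system", "name": name, "content": s[cursor:].strip()})
--             return out
--         nxt = opp.pop(0)
--         out.append({"role": "system", "name": name, "content": s[cursor:nxt].strip()})
--         cursor = nxt + (len(ASST) if is_user else len(USER))
--         is_user = not is_user
-- ===== Notes on version B (the rewrite author's own statement) =====
-- stated objective: alternative
-- what changed: A repeatedly calls str.find for the next expected marker while walking the string; B scans the string once to collect the sorted start-position lists of both markers and then consumes those two lists with an alternating merge loop (no further string searches).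
import Mathlib
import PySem

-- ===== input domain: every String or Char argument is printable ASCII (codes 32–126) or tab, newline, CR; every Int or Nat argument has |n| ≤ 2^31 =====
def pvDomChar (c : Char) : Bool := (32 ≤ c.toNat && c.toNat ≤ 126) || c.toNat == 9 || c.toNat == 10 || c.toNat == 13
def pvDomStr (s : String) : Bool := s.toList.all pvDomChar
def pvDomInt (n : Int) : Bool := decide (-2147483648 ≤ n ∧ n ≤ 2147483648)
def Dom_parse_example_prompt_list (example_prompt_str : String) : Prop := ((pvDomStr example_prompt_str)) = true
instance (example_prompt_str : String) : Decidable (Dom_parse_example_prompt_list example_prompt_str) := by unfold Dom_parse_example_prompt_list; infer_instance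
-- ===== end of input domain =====

-- B replaces A's repeated str.find scans by one pass collecting all marker start positions,
-- then consumes the two sorted position lists with an alternating merge loop (objective: alternative).

-- ===== PORT A =====
def pvMarkUser : List Char := "`example_user`".toList
def pvMarkAsst : List Char := "`example_assistant`".toList

def pvEntry (name content : String) : List (String × String) :=
  [("role", "system"), ("name", name), ("content", content)]

-- A's while-loop; fuel = cs.length + 1 never runs out (each iteration jumps past a whole marker)
def pvLoopA (cs : List Char) : Int → Nat → Nat → List (List (String × String))
  | _, _, 0 => []
  | curr_ind, i, fuel + 1 =>
    if curr_ind = -1 then []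
    else
      let curr_name : String := if i % 2 = 0 then "example_user" else "example_assistant"
      let curr_ind2 : Int := curr_ind + ((if i % 2 = 0 then pvMarkUser else pvMarkAsst).length : Int)
      let next_pat : List Char := if i % 2 = 0 then pvMarkAsst else pvMarkUser
      let next_ind : Int := PySem.Chars.findFrom cs next_pat curr_ind2 none
      let content : String :=
        if next_ind ≠ -1 then
          String.ofList (PySem.Chars.strip (PySem.List.slice cs (some curr_ind2) (some next_ind)))
        else
          String.ofList (PySem.Chars.strip (PySem.List.slice cs (some curr_ind2) none))
      pvEntry curr_name content :: pvLoopA cs next_ind (i + 1) fuel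

def parse_example_prompt_list (example_prompt_str : String) : List (List (String × String)) :=
  let cs := example_prompt_str.toList
  pvLoopA cs (PySem.Chars.find cs pvMarkUser) 0 (cs.length + 1)

-- ===== PORT B =====
-- all start positions of pat in cs, in increasing order (the one-scan `s.startswith(pat, j)` pass)
def pvOcc (cs pat : List Char) : List Nat :=
  (List.range cs.length).filter (fun j => PySem.Chars.startswith (cs.drop j) pat)

-- the alternating merge over the two remaining position lists ru / ra
def pvLoopB (cs : List Char) (isUser : Bool) (cursor : Nat) (ru ra : List Nat) :
    List (List (String × String)) :=
  match isUser with
  | true =>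
    match hA : ra.dropWhile (fun p => p < cursor) with
    | [] =>
        [pvEntry "example_user"
          (String.ofList (PySem.Chars.strip (PySem.List.slice cs (some (cursor : Int)) none)))]
    | nxt :: rest =>
        pvEntry "example_user"
          (String.ofList (PySem.Chars.strip (PySem.List.slice cs (some (cursor : Int)) (some (nxt : Int))))) ::
        pvLoopB cs false (nxt + pvMarkAsst.length) ru rest
  | false =>
    match hU : ru.dropWhile (fun p => p < cursor) with
    | [] =>
        [pvEntry "example_assistant"
          (String.ofList (PySem.Chars.strip (PySem.List.slice cs (some (cursor : Int)) none)))]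
    | nxt :: rest =>
        pvEntry "example_assistant"
          (String.ofList (PySem.Chars.strip (PySem.List.slice cs (some (cursor : Int)) (some (nxt : Int))))) ::
        pvLoopB cs true (nxt + pvMarkUser.length) rest ra
termination_by ru.length + ra.length
decreasing_by
  · have h1 := List.length_dropWhile_le (fun p => decide (p < cursor)) ra
    rw [hA] at h1
    simp at h1 ⊢; omega
  · have h1 := List.length_dropWhile_le (fun p => decide (p < cursor)) ru
    rw [hU] at h1
    simp at h1 ⊢; omega

def parse_example_prompt_list_alt (example_prompt_str : String) : List (List (String × String)) :=
  let cs := example_prompt_str.toList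
  let user_pos := pvOcc cs pvMarkUser
  let asst_pos := pvOcc cs pvMarkAsst
  match user_pos with
  | [] => []
  | p0 :: _ => pvLoopB cs true (p0 + pvMarkUser.length) user_pos asst_pos

-- ===== PRECONDITION & SPEC =====
def Spec_parse_example_prompt_list (example_prompt_str : String) (out : List (List (String × String))) : Prop := out = parse_example_prompt_list_alt example_prompt_str
instance (example_prompt_str : String) (out : List (List (String × String))) : Decidable (Spec_parse_example_prompt_list example_prompt_str out) := by unfold Spec_parse_example_prompt_list; infer_instance

-- ===== CLAIM (what is proved, stated in full; the proofs are below) =====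
def Claim_equal_parse_example_prompt_list : Prop := ∀ (example_prompt_str : String), Dom_parse_example_prompt_list example_prompt_str → Spec_parse_example_prompt_list example_prompt_str (parse_example_prompt_list example_prompt_str)

-- ===== LEMMAS AND PROOFS =====

lemma pv_mem_occ {cs pat : List Char} {j : Nat} :
    j ∈ pvOcc cs pat ↔ j < cs.length ∧ pat <+: cs.drop j := by
  simp [pvOcc, List.mem_filter, List.mem_range, PySem.Chars.startswith_iff]

lemma pv_occ_pairwise (cs pat : List Char) : (pvOcc cs pat).Pairwise (· < ·) :=
  List.Pairwise.filter _ List.pairwise_lt_range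

lemma pv_two_filters_le {α : Type} (p q : α → Bool) (l : List α)
    (hpq : ∀ x, ¬(p x = true ∧ q x = true)) :
    (l.filter p).length + (l.filter q).length ≤ l.length := by
  induction l with
  | nil => simp
  | cons a t ih =>
      by_cases hp : p a = true <;> by_cases hq : q a = true
      · exact absurd ⟨hp, hq⟩ (hpq a)
      all_goals simp [hp, hq]; omega

lemma pv_marks_disjoint (t : List Char) :
    ¬(PySem.Chars.startswith t pvMarkUser = true ∧ PySem.Chars.startswith t pvMarkAsst = true) := by
  rintro ⟨hu, ha⟩
  rw [PySem.Chars.startswith_iff] at hu ha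
  have hu' := List.prefix_iff_eq_take.mp hu
  have ha' := List.prefix_iff_eq_take.mp ha
  have h14 : pvMarkUser.length = 14 := by decide
  have h19 : pvMarkAsst.length = 19 := by decide
  rw [h14] at hu'
  rw [h19] at ha'
  have key : pvMarkAsst.take 14 = pvMarkUser := by
    rw [ha', hu', List.take_take]
    norm_num
  exact absurd key (by decide)

lemma pv_occ_count (cs : List Char) :
    (pvOcc cs pvMarkUser).length + (pvOcc cs pvMarkAsst).length ≤ cs.length := by
  have := pv_two_filters_le (fun j => PySem.Chars.startswith (cs.drop j) pvMarkUser)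
    (fun j => PySem.Chars.startswith (cs.drop j) pvMarkAsst) (List.range cs.length)
    (fun j => pv_marks_disjoint (cs.drop j))
  simpa [pvOcc, List.length_range] using this

-- dropping the already-consumed prefix does not change the dropWhile
lemma pv_dropWhile_pre {pre l : List Nat} {k : Nat} (h : ∀ x ∈ pre, x < k) :
    (pre ++ l).dropWhile (fun p => p < k) = l.dropWhile (fun p => p < k) := by
  induction pre with
  | nil => rfl
  | cons a t ih =>
      have ha : a < k := h a (by simp)
      rw [List.cons_append, List.dropWhile_cons]
      simp only [ha, decide_true, if_true]
      exact ih (fun x hx => h x (by simp [hx]))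

-- CORE: str.find(pat, k) = head of the occurrence list restricted to positions ≥ k
lemma pv_dropWhile_head_not_lt {l : List Nat} {k nxt : Nat} {rest : List Nat}
    (h : l.dropWhile (fun p => p < k) = nxt :: rest) : ¬ nxt < k := by
  have w : l.dropWhile (fun p => decide (p < k)) ≠ [] := by simp [h]
  have h2 := List.head_dropWhile_not (fun p => decide (p < k)) w
  have h3 : (l.dropWhile (fun p => decide (p < k))).head? = some nxt := by rw [h]; rfl
  rw [List.head?_eq_some_head w] at h3
  rw [Option.some_inj.mp h3] at h2
  simpa using h2

lemma pv_dropWhile_mem {l : List Nat} {k nxt : Nat} {rest : List Nat}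
    (h : l.dropWhile (fun p => p < k) = nxt :: rest) : nxt ∈ l := by
  have : nxt ∈ l.dropWhile (fun p => decide (p < k)) := by rw [h]; exact List.mem_cons_self
  exact (List.dropWhile_suffix _).subset this

lemma pv_occ_nonnil {cs pat : List Char} {j : Nat} (hp : pat ≠ []) (h : pat <+: cs.drop j) :
    j < cs.length := by
  by_contra hge
  rw [List.drop_eq_nil_of_le (by omega)] at h
  exact hp (List.prefix_nil.mp h)

-- CORE: str.find(pat, k) = head of the occurrence list restricted to positions ≥ k
lemma pv_find_core (cs pat : List Char) (hp : pat ≠ []) (k : Nat) (hk : k ≤ cs.length) :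
    PySem.Chars.findFrom cs pat (k : Int) none =
      (match (pvOcc cs pat).dropWhile (fun p => p < k) with
       | [] => (-1 : Int)
       | nxt :: _ => (nxt : Int)) := by
  have hsplit := List.takeWhile_append_dropWhile (p := fun p => decide (p < k)) (l := pvOcc cs pat)
  cases hD : (pvOcc cs pat).dropWhile (fun p => p < k) with
  | nil =>
      simp only
      rw [PySem.Chars.findFrom_natCast_eq_neg_one_iff cs pat k hk]
      intro hinf
      obtain ⟨j, hj⟩ := (PySem.Chars.exists_prefix_drop_iff_isIn pat (cs.drop k)).mpr
        ((PySem.Chars.isIn_iff_infix pat (cs.drop k)).mpr hinf)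
      rw [List.drop_drop] at hj
      have hmem : k + j ∈ pvOcc cs pat := pv_mem_occ.mpr ⟨pv_occ_nonnil hp hj, hj⟩
      rw [← hsplit, hD, List.append_nil] at hmem
      have := List.mem_takeWhile_imp hmem
      simp at this
  | cons nxt rest =>
      simp only
      have hmem := pv_dropWhile_mem hD
      obtain ⟨hnlt, hnpre⟩ := pv_mem_occ.mp hmem
      have hkn : ¬ nxt < k := pv_dropWhile_head_not_lt hD
      -- the searched pattern does occur in cs.drop k
      have hinf : pat <:+: cs.drop k := by
        rw [← PySem.Chars.isIn_iff_infix, ← PySem.Chars.exists_prefix_drop_iff_isIn]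
        exact ⟨nxt - k, by rw [List.drop_drop, show k + (nxt - k) = nxt by omega]; exact hnpre⟩
      have hne : PySem.Chars.findFrom cs pat (k : Int) none ≠ -1 := by
        rw [Ne, PySem.Chars.findFrom_natCast_eq_neg_one_iff cs pat k hk]
        simp [hinf]
      obtain ⟨h1, h2, h3⟩ := PySem.Chars.findFrom_natCast_spec cs pat k hk hne
      set r := PySem.Chars.findFrom cs pat (k : Int) none with hr
      have hrmem : r.toNat ∈ pvOcc cs pat := pv_mem_occ.mpr ⟨pv_occ_nonnil hp h2, h2⟩
      -- r.toNat is ≥ k, hence lands in nxt :: rest, hence nxt ≤ r.toNat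
      have hnle : nxt ≤ r.toNat := by
        rw [← hsplit, hD, List.mem_append] at hrmem
        rcases hrmem with htw | hcons
        · have := List.mem_takeWhile_imp htw
          simp at this
          omega
        · have hpw : (nxt :: rest).Pairwise (· < ·) := by
            have := (pv_occ_pairwise cs pat).sublist
              ((List.dropWhile_sublist (l := pvOcc cs pat) (p := fun p => decide (p < k))))
            rwa [hD] at this
          rcases List.mem_cons.mp hcons with he | ht
          · omega
          · have := (List.pairwise_cons.mp hpw).1 _ ht
            omega
      have hler : r.toNat ≤ nxt := by
        by_contra hgt
        exact h3 nxt (by omega) (by omega) hnpre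
      omega

lemma pvLoopA_neg_one (cs : List Char) (i fuel : Nat) : pvLoopA cs (-1) i fuel = [] := by
  cases fuel <;> simp [pvLoopA]

-- MAIN LOOP INVARIANT: A's while-loop equals B's merge loop
lemma pv_loop_eq (cs : List Char) :
    ∀ fuel (c i : Nat) (ru ra preU preA : List Nat),
      pvOcc cs pvMarkUser = preU ++ ru →
      pvOcc cs pvMarkAsst = preA ++ ra →
      (∀ x ∈ preU, x < c + (if i % 2 = 0 then pvMarkUser else pvMarkAsst).length) →
      (∀ x ∈ preA, x < c + (if i % 2 = 0 then pvMarkUser else pvMarkAsst).length) →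
      (if i % 2 = 0 then pvMarkUser else pvMarkAsst) <+: cs.drop c →
      ru.length + ra.length + 1 ≤ fuel →
      pvLoopA cs (c : Int) i fuel =
        pvLoopB cs (i % 2 == 0) (c + (if i % 2 = 0 then pvMarkUser else pvMarkAsst).length) ru ra := by
  intro fuel
  induction fuel with
  | zero => intro c i ru ra preU preA _ _ _ _ _ hfuel; omega
  | succ fuel ih =>
    intro c i ru ra preU preA hOU hOA hpreU hpreA hpat hfuel
    have hc : ¬((c : Int) = -1) := by omega
    by_cases hpar : i % 2 = 0
    · -- current marker is `example_user`
      simp only [hpar, reduceIte, beq_self_eq_true] at hpreU hpreA hpat ⊢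
      have hple := hpat.length_le
      rw [List.length_drop] at hple
      have h14 : pvMarkUser.length = 14 := by decide
      have hclen : c + pvMarkUser.length ≤ cs.length := by omega
      have hcast : (c : Int) + (pvMarkUser.length : Int) = ((c + pvMarkUser.length : Nat) : Int) := by
        push_cast; ring
      simp only [pvLoopA, hc, if_false, hpar, reduceIte, ne_eq]
      rw [hcast, pv_find_core cs pvMarkAsst (by decide) (c + pvMarkUser.length) hclen]
      have hdrop : (pvOcc cs pvMarkAsst).dropWhile (fun p => p < c + pvMarkUser.length)
          = ra.dropWhile (fun p => p < c + pvMarkUser.length) := by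
        rw [hOA]; exact pv_dropWhile_pre hpreA
      rw [hdrop]
      cases hD : ra.dropWhile (fun p => p < c + pvMarkUser.length) with
      | nil =>
          rw [pvLoopB.eq_def, hD]
          simp [pvLoopA_neg_one]
      | cons nxt rest =>
          rw [pvLoopB.eq_def, hD]
          have hx : ¬(((nxt : Nat) : Int) = -1) := by omega
          -- tail: apply the induction hypothesis one marker further on
          have hnotlt : ¬ nxt < c + pvMarkUser.length := pv_dropWhile_head_not_lt hD
          have hra : ra = ra.takeWhile (fun p => p < c + pvMarkUser.length) ++ nxt :: rest := by
            conv_lhs => rw [← List.takeWhile_append_dropWhile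
              (p := fun p => decide (p < c + pvMarkUser.length)) (l := ra)]
            rw [hD]
          have hmemA : nxt ∈ pvOcc cs pvMarkAsst := by
            rw [hOA]; exact List.mem_append_right _ (pv_dropWhile_mem hD)
          obtain ⟨hnlen, hnpre⟩ := pv_mem_occ.mp hmemA
          have h19 : pvMarkAsst.length = 19 := by decide
          have hifA : (if (i+1) % 2 = 0 then pvMarkUser else pvMarkAsst) = pvMarkAsst :=
            if_neg (by omega)
          have hlra := congrArg List.length hra
          simp only [List.length_append, List.length_cons] at hlra
          have hIH := ih nxt (i+1) ru rest preU
            (preA ++ ra.takeWhile (fun p => p < c + pvMarkUser.length) ++ [nxt])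
            hOU
            (by
              conv_lhs => rw [hOA, hra]
              simp only [List.append_assoc, List.singleton_append])
            (by rw [hifA]; intro x hx'; have := hpreU x hx'; omega)
            (by rw [hifA]
                intro x hx'
                simp only [List.mem_append, List.mem_singleton] at hx'
                rcases hx' with (hx'' | hx'') | hx''
                · have := hpreA x hx''; omega
                · have := List.mem_takeWhile_imp hx''
                  simp at this; omega
                · omega)
            (by rw [hifA]; exact hnpre)
            (by omega)
          rw [hifA] at hIH
          have hbeq1 : ((i+1) % 2 == 0) = false := by
            have h1 : (i+1) % 2 = 1 := by omega
            simp [h1]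
          rw [hbeq1] at hIH
          simp [hx, hIH]
    · -- current marker is `example_assistant`
      have hpar' : i % 2 = 1 := by omega
      have h10 : ((1:Nat) = 0) = False := by simp
      have hb10 : ((1:Nat) == 0) = false := rfl
      simp only [hpar', h10, hb10, if_false] at hpreU hpreA hpat ⊢
      have hple := hpat.length_le
      rw [List.length_drop] at hple
      have h19 : pvMarkAsst.length = 19 := by decide
      have hclen : c + pvMarkAsst.length ≤ cs.length := by omega
      have hcast : (c : Int) + (pvMarkAsst.length : Int) = ((c + pvMarkAsst.length : Nat) : Int) := by
        push_cast; ring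
      simp only [pvLoopA, hc, if_false, hpar', h10, ne_eq]
      rw [hcast, pv_find_core cs pvMarkUser (by decide) (c + pvMarkAsst.length) hclen]
      have hdrop : (pvOcc cs pvMarkUser).dropWhile (fun p => p < c + pvMarkAsst.length)
          = ru.dropWhile (fun p => p < c + pvMarkAsst.length) := by
        rw [hOU]; exact pv_dropWhile_pre hpreU
      rw [hdrop]
      cases hD : ru.dropWhile (fun p => p < c + pvMarkAsst.length) with
      | nil =>
          rw [pvLoopB.eq_def, hD]
          simp [pvLoopA_neg_one]
      | cons nxt rest =>
          rw [pvLoopB.eq_def, hD]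
          have hx : ¬(((nxt : Nat) : Int) = -1) := by omega
          have hnotlt : ¬ nxt < c + pvMarkAsst.length := pv_dropWhile_head_not_lt hD
          have hru : ru = ru.takeWhile (fun p => p < c + pvMarkAsst.length) ++ nxt :: rest := by
            conv_lhs => rw [← List.takeWhile_append_dropWhile
              (p := fun p => decide (p < c + pvMarkAsst.length)) (l := ru)]
            rw [hD]
          have hmemU : nxt ∈ pvOcc cs pvMarkUser := by
            rw [hOU]; exact List.mem_append_right _ (pv_dropWhile_mem hD)
          obtain ⟨hnlen, hnpre⟩ := pv_mem_occ.mp hmemU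
          have h14 : pvMarkUser.length = 14 := by decide
          have hifU : (if (i+1) % 2 = 0 then pvMarkUser else pvMarkAsst) = pvMarkUser :=
            if_pos (by omega)
          have hlru := congrArg List.length hru
          simp only [List.length_append, List.length_cons] at hlru
          have hIH := ih nxt (i+1) rest ra
            (preU ++ ru.takeWhile (fun p => p < c + pvMarkAsst.length) ++ [nxt])
            preA
            (by
              conv_lhs => rw [hOU, hru]
              simp only [List.append_assoc, List.singleton_append])
            hOA
            (by rw [hifU]
                intro x hx'
                simp only [List.mem_append, List.mem_singleton] at hx'
                rcases hx' with (hx'' | hx'') | hx''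
                · have := hpreU x hx''; omega
                · have := List.mem_takeWhile_imp hx''
                  simp at this; omega
                · omega)
            (by rw [hifU]; intro x hx'; have := hpreA x hx'; omega)
            (by rw [hifU]; exact hnpre)
            (by omega)
          rw [hifU] at hIH
          have hbeq1 : ((i+1) % 2 == 0) = true := by
            have h1 : (i+1) % 2 = 0 := by omega
            simp [h1]
          rw [hbeq1] at hIH
          simp [hx, hIH]

-- ===== VERDICT (by name: the statement is the Claim_ definition above) =====
theorem parse_example_prompt_list_spec : Claim_equal_parse_example_prompt_list := by
  unfold Claim_equal_parse_example_prompt_list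
  intro s _
  show pvLoopA s.toList (PySem.Chars.find s.toList pvMarkUser) 0 (s.toList.length + 1)
      = (match pvOcc s.toList pvMarkUser with
         | [] => []
         | p0 :: _ => pvLoopB s.toList true (p0 + pvMarkUser.length)
             (pvOcc s.toList pvMarkUser) (pvOcc s.toList pvMarkAsst))
  have hdw0 : (pvOcc s.toList pvMarkUser).dropWhile (fun p => p < 0) = pvOcc s.toList pvMarkUser := by
    cases h : pvOcc s.toList pvMarkUser with
    | nil => rfl
    | cons a t => rw [List.dropWhile_cons]; simp
  have hfind : PySem.Chars.find s.toList pvMarkUser =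
      (match pvOcc s.toList pvMarkUser with
       | [] => (-1 : Int)
       | nxt :: _ => (nxt : Int)) := by
    rw [← PySem.Chars.findFrom_zero, show (0 : Int) = ((0 : Nat) : Int) from rfl,
      pv_find_core s.toList pvMarkUser (by decide) 0 (Nat.zero_le _), hdw0]
  rw [hfind]
  cases hU : pvOcc s.toList pvMarkUser with
  | nil => simp [pvLoopA_neg_one]
  | cons p0 tl =>
      have hp0 : p0 ∈ pvOcc s.toList pvMarkUser := by rw [hU]; exact List.mem_cons_self
      obtain ⟨hp0len, hp0pre⟩ := pv_mem_occ.mp hp0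
      have hcnt := pv_occ_count s.toList
      rw [hU] at hcnt
      have := pv_loop_eq s.toList (s.toList.length + 1) p0 0 (p0 :: tl)
        (pvOcc s.toList pvMarkAsst) [] []
        (by simp [hU])
        (by simp)
        (by simp)
        (by simp)
        (by simpa using hp0pre)
        (by simp only [List.length_cons] at hcnt ⊢; omega)
      simpa using this
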